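-- pv_equiv track=rewrite | github.com/Oumaima-02/Python-UF2 | python[Exercici6]/functions.py | num_seq
-- ===== SOURCE A (Python) =====
-- def num_seq(num):
--     i, sum = 0, 0
--     llista = list()
--     while i < num:
--         sum = sum + i
--         if sum < num:
--             llista.append(i)
--         i = i + 1
--     return llista
-- ===== SOURCE B (Python) =====
-- def num_seq(num):
--     # Binary search for the cutoff k = least k with k*(k+1)//2 >= num,
--     # then the answer is simply [0, 1, ..., k-1].
--     if num <= 0:
--         return []
--     lo, hi = 0, num
--     # invariant: lo*(lo+1)//2 < num <= hi*(hi+1)//2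
--     while hi - lo > 1:
--         mid = (lo + hi) // 2
--         if mid * (mid + 1) // 2 < num:
--             lo = mid
--         else:
--             hi = mid
--     return list(range(hi))
-- ===== Notes on version B (the rewrite author's own statement) =====
-- stated objective: faster
-- what changed: Replaces the O(num) while-loop that accumulates a running triangular sum with a binary search for the cutoff k (least k with k(k+1)/2 >= num) and returns list(range(k)).
import Mathlib
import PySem

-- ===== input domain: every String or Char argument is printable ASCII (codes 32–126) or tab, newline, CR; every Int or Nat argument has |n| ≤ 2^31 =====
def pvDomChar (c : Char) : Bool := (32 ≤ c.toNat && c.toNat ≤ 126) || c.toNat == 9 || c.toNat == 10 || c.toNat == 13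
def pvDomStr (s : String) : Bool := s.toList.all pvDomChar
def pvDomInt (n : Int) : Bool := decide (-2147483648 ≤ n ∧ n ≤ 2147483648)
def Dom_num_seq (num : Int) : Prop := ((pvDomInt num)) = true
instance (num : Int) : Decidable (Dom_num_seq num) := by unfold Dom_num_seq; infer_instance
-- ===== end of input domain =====

-- B replaces A's O(num) scan by a binary search for the cutoff k and returns range(k).

-- ===== PORT A =====
def numSeqLoop (num i sum : Int) (llista : List Int) : List Int :=
  if i < num then
    let sum' := sum + i
    numSeqLoop num (i + 1) sum' (if sum' < num then llista ++ [i] else llista)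
  else llista
termination_by (num - i).toNat
decreasing_by omega

def num_seq (num : Int) : List Int := numSeqLoop num 0 0 []

-- ===== PORT B =====
def numSeqSearch (num lo hi : Int) : Int :=
  if hi - lo > 1 then
    let mid := PySem.Int.floordiv (lo + hi) 2
    if PySem.Int.floordiv (mid * (mid + 1)) 2 < num then numSeqSearch num mid hi
    else numSeqSearch num lo mid
  else hi
termination_by (hi - lo).toNat
decreasing_by
  · have h1 : lo + 1 ≤ PySem.Int.floordiv (lo + hi) 2 := by
      rw [PySem.Int.le_floordiv_iff_mul_le (by omega : (0:Int) < 2)]; omega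
    omega
  · have h1 : PySem.Int.floordiv (lo + hi) 2 < hi := by
      rw [PySem.Int.floordiv_lt_iff_lt_mul (by omega : (0:Int) < 2)]; omega
    omega

def num_seq_alt (num : Int) : List Int :=
  if num ≤ 0 then []
  else PySem.List.pyRange 0 (numSeqSearch num 0 num) 1

-- ===== PRECONDITION & SPEC =====
def Spec_num_seq (num : Int) (out : List Int) : Prop := out = num_seq_alt num
instance (num : Int) (out : List Int) : Decidable (Spec_num_seq num out) := by unfold Spec_num_seq; infer_instance

-- ===== CLAIM (what is proved, stated in full; the proofs are below) =====
def Claim_equal_num_seq : Prop := ∀ (num : Int), Dom_num_seq num → Spec_num_seq num (num_seq num)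

-- ===== LEMMAS AND PROOFS =====

-- Once the triangular sum has reached num, A's loop never appends again.
theorem numSeqLoop_sat (num : Int) : ∀ (i sum : Int) (acc : List Int),
    0 ≤ i → 2 * sum = i * (i - 1) → 2 * num ≤ i * (i + 1) →
    numSeqLoop num i sum acc = acc := by
  intro i sum acc hi hsum hsat
  induction h : (num - i).toNat generalizing i sum acc with
  | zero =>
    rw [numSeqLoop]
    have : ¬ i < num := by omega
    simp [this]
  | succ n ih =>
    rw [numSeqLoop]
    by_cases hlt : i < num
    · have h2 : 2 * (sum + i) = i * (i + 1) := by nlinarith [hsum]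
      have hnot : ¬ sum + i < num := by omega
      have hnext : 2 * num ≤ (i + 1) * ((i + 1) + 1) := by nlinarith [hsat, hi]
      have hsum' : 2 * (sum + i) = (i + 1) * ((i + 1) - 1) := by nlinarith [hsum]
      simp only [hlt, if_true, hnot, if_false]
      exact ih (i + 1) (sum + i) acc (by omega) hsum' hnext (by omega)
    · simp [hlt]

-- While i is below the cutoff K, the loop appends every index.
theorem numSeqLoop_grow (num K : Int)
    (hK1 : K ≤ num) (hK2 : 2 * num ≤ K * (K + 1)) (hK3 : (K - 1) * K < 2 * num) :
    ∀ (i sum : Int) (acc : List Int),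
    0 ≤ i → i ≤ K → 2 * sum = i * (i - 1) →
    numSeqLoop num i sum acc = acc ++ PySem.List.pyRange i K 1 := by
  intro i sum acc hi hiK hsum
  induction h : (K - i).toNat generalizing i sum acc with
  | zero =>
    have hiK' : i = K := by omega
    subst hiK'
    rw [PySem.List.pyRange_one_eq_nil (by omega)]
    rw [numSeqLoop_sat num i sum acc hi hsum hK2]
    simp
  | succ n ih =>
    have hlt : i < K := by omega
    have hcond : i < num := by omega
    have hmono : i * (i + 1) ≤ (K - 1) * K := by
      nlinarith [mul_nonneg (show (0:Int) ≤ K - 1 - i by omega) (show (0:Int) ≤ K + i by omega)]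
    have h2 : 2 * (sum + i) = i * (i + 1) := by nlinarith [hsum]
    have happ : sum + i < num := by omega
    rw [numSeqLoop]
    simp only [hcond, if_true, happ, if_true]
    rw [ih (i + 1) (sum + i) (acc ++ [i]) (by omega) (by omega) (by nlinarith [hsum]) (by omega)]
    rw [PySem.List.pyRange_one_cons hlt]
    simp

-- The binary search returns the least k with k*(k+1)/2 ≥ num.
theorem numSeqSearch_spec (num : Int) : ∀ (lo hi : Int),
    0 ≤ lo → lo < hi → lo * (lo + 1) < 2 * num → 2 * num ≤ hi * (hi + 1) →
    lo < numSeqSearch num lo hi ∧ numSeqSearch num lo hi ≤ hi ∧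
      (numSeqSearch num lo hi - 1) * numSeqSearch num lo hi < 2 * num ∧
      2 * num ≤ numSeqSearch num lo hi * (numSeqSearch num lo hi + 1) := by
  suffices H : ∀ (n : Nat) (lo hi : Int), (hi - lo).toNat ≤ n →
      0 ≤ lo → lo < hi → lo * (lo + 1) < 2 * num → 2 * num ≤ hi * (hi + 1) →
      lo < numSeqSearch num lo hi ∧ numSeqSearch num lo hi ≤ hi ∧
        (numSeqSearch num lo hi - 1) * numSeqSearch num lo hi < 2 * num ∧
        2 * num ≤ numSeqSearch num lo hi * (numSeqSearch num lo hi + 1) by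
    intro lo hi hlo hlt hlow hhigh
    exact H (hi - lo).toNat lo hi (le_refl _) hlo hlt hlow hhigh
  intro n
  induction n with
  | zero => intro lo hi hle hlo hlt hlow hhigh; omega
  | succ n ih =>
    intro lo hi hle hlo hlt hlow hhigh
    rw [numSeqSearch]
    by_cases hgap : hi - lo > 1
    · have hmidlt : PySem.Int.floordiv (lo + hi) 2 < hi := by
        rw [PySem.Int.floordiv_lt_iff_lt_mul (by omega : (0:Int) < 2)]; omega
      have hmidgt : lo + 1 ≤ PySem.Int.floordiv (lo + hi) 2 := by
        rw [PySem.Int.le_floordiv_iff_mul_le (by omega : (0:Int) < 2)]; omega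
      set mid := PySem.Int.floordiv (lo + hi) 2 with hmid
      have hcond : PySem.Int.floordiv (mid * (mid + 1)) 2 < num ↔ mid * (mid + 1) < 2 * num := by
        rw [PySem.Int.floordiv_lt_iff_lt_mul (by omega : (0:Int) < 2)]; omega
      simp only [hgap, if_true]
      by_cases hc : PySem.Int.floordiv (mid * (mid + 1)) 2 < num
      · have hml : mid * (mid + 1) < 2 * num := hcond.mp hc
        simp only [hc, if_true]
        have := ih mid hi (by omega) (by omega) (by omega) hml hhigh
        exact ⟨by omega, this.2.1, this.2.2⟩
      · have hmh : 2 * num ≤ mid * (mid + 1) := by omega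
        simp only [hc, if_false]
        have := ih lo mid (by omega) hlo (by omega) hlow hmh
        exact ⟨this.1, by omega, this.2.2⟩
    · -- hi = lo + 1: the base case of the search
      simp only [if_neg hgap]
      have hhi : hi = lo + 1 := by omega
      refine ⟨by omega, by omega, ?_, ?_⟩
      · have : (hi - 1) * hi = lo * (lo + 1) := by rw [hhi]; ring
        omega
      · exact hhigh

-- ===== VERDICT (by name: the statement is the Claim_ definition above) =====
theorem num_seq_spec : Claim_equal_num_seq := by
  intro num _
  unfold Spec_num_seq num_seq num_seq_alt
  by_cases hnum : num ≤ 0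
  · rw [numSeqLoop]
    simp [hnum, show ¬ (0:Int) < num by omega]
  · have hpos : 0 < num := by omega
    have hspec := numSeqSearch_spec num 0 num (by omega) hpos (by omega)
      (by nlinarith [hpos])
    rw [numSeqLoop_grow num (numSeqSearch num 0 num) hspec.2.1 hspec.2.2.2
      hspec.2.2.1 0 0 [] (by omega) (le_of_lt hspec.1) (by ring)]
    simp [hnum]
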